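-- pv_equiv track=rewrite | github.com/instadeepai/winnow | winnow/calibration/features/utils.py | compute_complementary_ion_count
-- ===== SOURCE A (Python) =====
-- from typing import Dict, List, Optional, Any, Set, Tuple, Iterator, Union
--
-- def compute_complementary_ion_count(
--     matched_ion_annotations: List[str], peptide_length: int
-- ) -> int:
--     """Count bond positions where both b and y ions are matched.
--
--     For a peptide of length n, bond position i produces b_i and y_(n-1-i).
--     Finding both ions for the same bond provides stronger evidence.
--
--     Args:
--         matched_ion_annotations: Ion annotations for matched peaks only (E.g. "b1+1", "y2+2").
--         peptide_length: Number of amino acid residues in the peptide.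
--
--     Returns:
--         Number of bond positions where both complementary b and y ions matched.
--     """
--     b_indices = set()
--     y_indices = set()
--
--     for ann in matched_ion_annotations:
--         # Handle charge states: "b1", "b2+2", "y3+3"
--         base = ann.split("+")[0]
--         if base.startswith("b") and base[1:].isdigit():
--             b_indices.add(int(base[1:]))
--         elif base.startswith("y") and base[1:].isdigit():
--             y_indices.add(int(base[1:]))
--
--     # For peptide of length n: bond i produces b_i and y_(n-i)
--     # e.g., ACDK (length 4): b1 pairs with y3, b2 pairs with y2, b3 pairs with y1
--     return sum(1 for i in b_indices if (peptide_length - i) in y_indices)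
-- ===== SOURCE B (Python) =====
-- def compute_complementary_ion_count(matched_ion_annotations, peptide_length):
--     # Sort-then-scan: encode each matched ion as one integer mark -- 2*i for b_i,
--     # 2*(peptide_length - j) + 1 for y_j -- so a bond position p has both ions
--     # exactly when the consecutive marks 2*p and 2*p+1 both occur.  Sort the
--     # distinct marks and count adjacent pairs (u, u+1) with u even.
--     marks = []
--     for ann in matched_ion_annotations:
--         base = ann.split("+")[0]
--         if base.startswith("b") and base[1:].isdigit():
--             marks.append(2 * int(base[1:]))
--         elif base.startswith("y") and base[1:].isdigit():
--             marks.append(2 * (peptide_length - int(base[1:])) + 1)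
--     marks = sorted(set(marks))
--     return sum(1 for u, v in zip(marks, marks[1:]) if v == u + 1 and u % 2 == 0)
-- ===== Notes on version B (the rewrite author's own statement) =====
-- stated objective: alternative
-- what changed: B replaces A's two hash sets and the final complement-membership probe by sort-then-scan: each annotation is encoded as one integer mark (2*i for b_i, 2*(peptide_length-j)+1 for y_j), the distinct marks are sorted, and adjacent consecutive pairs (u, u+1) with u even are counted.
import Mathlib
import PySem

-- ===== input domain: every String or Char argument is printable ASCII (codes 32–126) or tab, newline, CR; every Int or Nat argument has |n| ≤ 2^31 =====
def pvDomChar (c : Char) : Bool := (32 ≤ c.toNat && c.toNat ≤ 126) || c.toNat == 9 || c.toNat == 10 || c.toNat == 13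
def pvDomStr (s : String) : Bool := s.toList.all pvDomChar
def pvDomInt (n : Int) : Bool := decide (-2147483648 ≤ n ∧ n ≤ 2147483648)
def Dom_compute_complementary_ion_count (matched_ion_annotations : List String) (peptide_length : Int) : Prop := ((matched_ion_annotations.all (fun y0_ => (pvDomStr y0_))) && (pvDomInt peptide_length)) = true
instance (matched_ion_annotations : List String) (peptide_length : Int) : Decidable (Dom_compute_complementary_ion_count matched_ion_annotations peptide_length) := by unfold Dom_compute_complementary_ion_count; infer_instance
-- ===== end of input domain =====

-- B replaces A's two hash sets and the final membership probe by sort-then-scan: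
-- each matched ion becomes one integer mark (2*i for b_i, 2*(n-j)+1 for y_j), the
-- distinct marks are sorted, and adjacent consecutive pairs (u, u+1) with u even
-- are counted (objective: alternative, same asymptotic cost).

-- ===== PORT A =====
-- ann.split("+")[0] (split always yields a nonempty list) and base[1:], the parse
-- expressions both Pythons share verbatim.
def pvBase (ann : String) : List Char := (PySem.Chars.splitOn ann.toList ['+']).headD []
def pvTail (ann : String) : List Char := PySem.List.slice (pvBase ann) (some 1) none
-- the two branch tests and int(base[1:]) (tail is all digits when used)
def pvB (ann : String) : Bool := PySem.Chars.startswith (pvBase ann) ['b'] && PySem.Chars.strIsdigit (pvTail ann)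
def pvY (ann : String) : Bool := PySem.Chars.startswith (pvBase ann) ['y'] && PySem.Chars.strIsdigit (pvTail ann)
def pvVal (ann : String) : Int := (PySem.Int.ofChars? (pvTail ann)).getD 0

-- A's loop body: classify the annotation and add its index to one of two sets.
def pvStepA (st : PySem.Set Int × PySem.Set Int) (ann : String) : PySem.Set Int × PySem.Set Int :=
  if pvB ann then (PySem.Set.add st.1 (pvVal ann), st.2)
  else if pvY ann then (st.1, PySem.Set.add st.2 (pvVal ann))
  else st

def compute_complementary_ion_count (matched_ion_annotations : List String) (peptide_length : Int) : Int :=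
  let st := matched_ion_annotations.foldl pvStepA (PySem.Set.empty, PySem.Set.empty)
  -- sum(1 for i in b_indices if (peptide_length - i) in y_indices): an order-independent count
  ((st.1.countP (fun i => PySem.Set.contains st.2 (peptide_length - i)) : Nat) : Int)

-- ===== PORT B =====
-- B's loop body: append the annotation's integer mark (2*i for b, 2*(n-j)+1 for y).
def pvMarkStep (n : Int) (acc : List Int) (ann : String) : List Int :=
  if pvB ann then acc ++ [2 * pvVal ann]
  else if pvY ann then acc ++ [2 * (n - pvVal ann) + 1]
  else acc

def compute_complementary_ion_count_alt (matched_ion_annotations : List String) (peptide_length : Int) : Int :=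
  let marks := matched_ion_annotations.foldl (pvMarkStep peptide_length) []
  let s := PySem.List.sorted (PySem.Set.ofList marks) (fun x => x) false
  -- sum(1 for u, v in zip(marks, marks[1:]) if v == u + 1 and u % 2 == 0)
  (((s.zip (s.drop 1)).countP (fun q => (q.2 == q.1 + 1) && (PySem.Int.mod q.1 2 == 0)) : Nat) : Int)

-- ===== PRECONDITION & SPEC =====
def Spec_compute_complementary_ion_count (matched_ion_annotations : List String) (peptide_length : Int) (out : Int) : Prop := out = compute_complementary_ion_count_alt matched_ion_annotations peptide_length
instance (matched_ion_annotations : List String) (peptide_length : Int) (out : Int) : Decidable (Spec_compute_complementary_ion_count matched_ion_annotations peptide_length out) := by unfold Spec_compute_complementary_ion_count; infer_instance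

-- ===== CLAIM (what is proved, stated in full; the proofs are below) =====
def Claim_equal_compute_complementary_ion_count : Prop := ∀ (matched_ion_annotations : List String) (peptide_length : Int), Dom_compute_complementary_ion_count matched_ion_annotations peptide_length → Spec_compute_complementary_ion_count matched_ion_annotations peptide_length (compute_complementary_ion_count matched_ion_annotations peptide_length)

-- ===== LEMMAS AND PROOFS =====

-- Membership in A's accumulated b-set after the fold.
lemma pv_memA_b (anns : List String) : ∀ (bs ys : PySem.Set Int) (x : Int),
    x ∈ (anns.foldl pvStepA (bs, ys)).1 ↔
      x ∈ bs ∨ ∃ ann ∈ anns, pvB ann = true ∧ x = pvVal ann := by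
  induction anns with
  | nil => intro bs ys x; simp
  | cons a t ih =>
      intro bs ys x
      by_cases hb : pvB a <;> by_cases hy : pvY a <;>
        simp only [List.foldl_cons, pvStepA, hb, hy, if_true, if_false,
          Bool.false_eq_true, ih, PySem.Set.mem_add, List.mem_cons] <;>
        constructor <;> aesop
-- Membership in A's accumulated y-set after the fold (the elif branch: ¬b ∧ y).
lemma pv_memA_y (anns : List String) : ∀ (bs ys : PySem.Set Int) (x : Int),
    x ∈ (anns.foldl pvStepA (bs, ys)).2 ↔
      x ∈ ys ∨ ∃ ann ∈ anns, (pvB ann = false ∧ pvY ann = true) ∧ x = pvVal ann := by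
  induction anns with
  | nil => intro bs ys x; simp
  | cons a t ih =>
      intro bs ys x
      by_cases hb : pvB a <;> by_cases hy : pvY a <;>
        simp only [List.foldl_cons, pvStepA, hb, hy, if_true, if_false,
          Bool.false_eq_true, ih, PySem.Set.mem_add, List.mem_cons] <;>
        constructor <;> aesop
-- A's two sets stay duplicate-free.
lemma pv_nodupA (anns : List String) : ∀ (bs ys : PySem.Set Int), bs.Nodup → ys.Nodup →
    (anns.foldl pvStepA (bs, ys)).1.Nodup ∧ (anns.foldl pvStepA (bs, ys)).2.Nodup := by
  induction anns with
  | nil => intro bs ys h1 h2; exact ⟨h1, h2⟩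
  | cons a t ih =>
      intro bs ys h1 h2
      by_cases hb : pvB a
      · simpa [pvStepA, hb] using ih _ _ (PySem.Set.nodup_add _ _ h1) h2
      · by_cases hy : pvY a
        · simpa [pvStepA, hb, hy] using ih _ _ h1 (PySem.Set.nodup_add _ _ h2)
        · simpa [pvStepA, hb, hy] using ih bs ys h1 h2

-- Membership in B's mark list after the fold.
lemma pv_memB (n : Int) (anns : List String) : ∀ (acc : List Int) (x : Int),
    x ∈ anns.foldl (pvMarkStep n) acc ↔
      x ∈ acc ∨ (∃ ann ∈ anns, pvB ann = true ∧ x = 2 * pvVal ann) ∨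
        (∃ ann ∈ anns, (pvB ann = false ∧ pvY ann = true) ∧ x = 2 * (n - pvVal ann) + 1) := by
  induction anns with
  | nil => intro acc x; simp
  | cons a t ih =>
      intro acc x
      by_cases hb : pvB a <;> by_cases hy : pvY a <;>
        simp only [List.foldl_cons, pvMarkStep, hb, hy, if_true, if_false,
          Bool.false_eq_true, ih, List.mem_append, List.mem_cons] <;>
        constructor <;> aesop
-- The adjacent-pair scan of a strictly increasing list counts the elements whose
-- successor is also present (B's zip scan, characterised without positions).
lemma pv_adj_count (p : Int → Bool) : ∀ (L : List Int), L.Pairwise (· < ·) →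
    (L.zip (L.drop 1)).countP (fun q => (q.2 == q.1 + 1) && p q.1)
      = L.countP (fun u => p u && decide ((u + 1) ∈ L)) := by
  intro L
  induction L with
  | nil => intro _; simp
  | cons u t ih =>
      intro hp
      cases t with
      | nil =>
          have h1 : decide ((u + 1) ∈ [u]) = false := by
            simp only [List.mem_singleton, decide_eq_false_iff_not]; omega
          simp only [List.drop_one, List.tail_cons, List.zip_nil_right, List.countP_nil,
            List.countP_cons, h1, Bool.and_false]
          simp
      | cons v t' =>
          have hp' : (v :: t').Pairwise (· < ·) := hp.tail
          have huv : u < v := (List.pairwise_cons.1 hp).1 v (by simp)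
          have hut : ∀ w ∈ t', u < w := fun w hw => (List.pairwise_cons.1 hp).1 w (by simp [hw])
          have hvt : ∀ w ∈ t', v < w := fun w hw => (List.pairwise_cons.1 hp').1 w hw
          -- head membership: u+1 occurs iff it is the very next element
          have hmem : ((u + 1) ∈ u :: v :: t') ↔ v = u + 1 := by
            simp only [List.mem_cons]
            constructor
            · rintro (h | h | h)
              · omega
              · omega
              · exact absurd (hvt _ h) (by omega)
            · intro h; exact Or.inr (Or.inl h.symm)
          -- for tail elements, membership of w+1 is unaffected by the head u
          have htail : ∀ w ∈ v :: t',
              (p w && decide ((w + 1) ∈ v :: t')) = (p w && decide ((w + 1) ∈ u :: v :: t')) := by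
            intro w hw
            have hwu : u < w := by
              rcases List.mem_cons.1 hw with rfl | hw'
              · exact huv
              · exact hut _ hw'
            have hiff : ((w + 1) ∈ u :: v :: t') ↔ ((w + 1) ∈ v :: t') := by
              constructor
              · intro h
                rcases List.mem_cons.1 h with h' | h'
                · omega
                · exact h'
              · intro h; exact List.mem_cons_of_mem _ h
            simp [hiff]
          have hhead : ((v == u + 1) && p u) = (p u && decide ((u + 1) ∈ u :: v :: t')) := by
            rcases Bool.eq_false_or_eq_true (p u) with h | h <;>
              by_cases hv : v = u + 1 <;> simp [h, hv, hmem]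
          have hz := ih hp'
          simp only [List.drop_one, List.tail_cons] at hz
          have ht2 : List.countP (fun w => p w && decide ((w + 1) ∈ v :: t')) (v :: t')
              = List.countP (fun w => p w && decide ((w + 1) ∈ u :: v :: t')) (v :: t') :=
            List.countP_congr (fun w hw => by
              have hwu : u < w := by
                rcases List.mem_cons.1 hw with rfl | hw'
                · exact huv
                · exact hut _ hw'
              simp only [List.mem_cons, Bool.and_eq_true, decide_eq_true_eq]
              constructor
              · rintro ⟨h1, h2⟩; exact ⟨h1, Or.inr h2⟩
              · rintro ⟨h1, h2⟩
                refine ⟨h1, ?_⟩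
                rcases h2 with h2 | h2
                · omega
                · exact h2)
          simp only [List.drop_one, List.tail_cons, List.zip_cons_cons, List.countP_cons,
            hz, hhead]
          simp only [List.countP_cons] at ht2
          omega

-- Parity facts for the two mark shapes.
lemma pv_even_mark (i : Int) : (PySem.Int.mod (2 * i) 2 == 0) = true := by
  simp only [beq_iff_eq, PySem.Int.mod_eq_zero_iff_dvd]
  exact Dvd.intro i rfl
lemma pv_odd_mark (i : Int) : (PySem.Int.mod (2 * i + 1) 2 == 0) = false := by
  simp only [beq_eq_false_iff_ne, ne_eq, PySem.Int.mod_eq_zero_iff_dvd]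
  omega

-- ===== VERDICT (by name: the statement is the Claim_ definition above) =====
theorem compute_complementary_ion_count_spec : Claim_equal_compute_complementary_ion_count := by
  intro anns n _
  unfold Spec_compute_complementary_ion_count compute_complementary_ion_count compute_complementary_ion_count_alt
  dsimp only
  set st := anns.foldl pvStepA (PySem.Set.empty, PySem.Set.empty) with hst
  set marks := anns.foldl (pvMarkStep n) [] with hmk
  set L := PySem.List.sorted (PySem.Set.ofList marks) (fun x => x) false with hL
  have hLlt : L.Pairwise (· < ·) := PySem.List.sorted_ofList_pairwise_lt marks
  have hLnd : L.Nodup := hLlt.imp (fun h => ne_of_lt h)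
  have hLm : ∀ x : Int, x ∈ L ↔ x ∈ marks := by
    intro x
    rw [hL, PySem.List.mem_sorted, PySem.Set.mem_ofList]
  have hbs : ∀ x : Int, x ∈ st.1 ↔ ∃ ann ∈ anns, pvB ann = true ∧ x = pvVal ann := by
    intro x; rw [hst, pv_memA_b]; simp [PySem.Set.empty]
  have hys : ∀ x : Int, x ∈ st.2 ↔ ∃ ann ∈ anns, (pvB ann = false ∧ pvY ann = true) ∧ x = pvVal ann := by
    intro x; rw [hst, pv_memA_y]; simp [PySem.Set.empty]
  have hmm : ∀ x : Int, x ∈ marks ↔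
      (∃ ann ∈ anns, pvB ann = true ∧ x = 2 * pvVal ann) ∨
        (∃ ann ∈ anns, (pvB ann = false ∧ pvY ann = true) ∧ x = 2 * (n - pvVal ann) + 1) := by
    intro x; rw [hmk, pv_memB]; simp
  obtain ⟨hnd1, hnd2⟩ := pv_nodupA anns PySem.Set.empty PySem.Set.empty List.nodup_nil List.nodup_nil
  rw [← hst] at hnd1 hnd2
  -- rewrite B's scan into a membership count over L
  rw [pv_adj_count (fun u => PySem.Int.mod u 2 == 0) L hLlt]
  -- both sides are lengths of filtered nodup lists with the same members
  congr 1
  rw [List.countP_eq_length_filter, List.countP_eq_length_filter]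
  have hperm : List.Perm
      ((st.1.filter (fun i => PySem.Set.contains st.2 (n - i))).map (fun i => 2 * i))
      (L.filter (fun u => (PySem.Int.mod u 2 == 0) && decide ((u + 1) ∈ L))) := by
    rw [List.perm_ext_iff_of_nodup]
    · intro x
      simp only [List.mem_map, List.mem_filter, Bool.and_eq_true, decide_eq_true_eq]
      constructor
      · rintro ⟨i, ⟨hib, hiy⟩, rfl⟩
        rw [PySem.Set.contains_iff, hys] at hiy
        obtain ⟨ann, hm, h1, h2⟩ := hiy
        rw [hbs] at hib
        refine ⟨?_, pv_even_mark i, ?_⟩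
        · refine (hLm _).2 ((hmm _).2 (Or.inl ?_))
          obtain ⟨a2, hm2, h12, h22⟩ := hib
          exact ⟨a2, hm2, h12, by omega⟩
        · rw [hLm, hmm]
          exact Or.inr ⟨ann, hm, h1, by omega⟩
      · rintro ⟨hxL, hxe, hx1⟩
        rw [hLm, hmm] at hxL
        rcases hxL with ⟨ann, hm, h1, rfl⟩ | ⟨ann, hm, h1, rfl⟩
        · refine ⟨pvVal ann, ⟨(hbs _).2 ⟨ann, hm, h1, rfl⟩, ?_⟩, rfl⟩
          rw [PySem.Set.contains_iff, hys]
          rw [hLm, hmm] at hx1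
          rcases hx1 with ⟨a2, hm2, h12, h22⟩ | ⟨a2, hm2, h12, h22⟩
          · exact absurd h22 (by omega)
          · exact ⟨a2, hm2, h12, by omega⟩
        · exact absurd hxe (by simp only [pv_odd_mark, Bool.false_eq_true]; exact not_false)
    · refine (List.Nodup.filter _ hnd1).map ?_
      intro a b h
      dsimp at h
      omega
    · exact hLnd.filter _
  calc (st.1.filter (fun i => PySem.Set.contains st.2 (n - i))).length
      = ((st.1.filter (fun i => PySem.Set.contains st.2 (n - i))).map (fun i => 2 * i)).length := by
        rw [List.length_map]
    _ = (L.filter (fun u => (PySem.Int.mod u 2 == 0) && decide ((u + 1) ∈ L))).length := hperm.length_eq
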